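-- pv_equiv track=rewrite | github.com/pi-kolo/Advent-of-code-2023 | Day 14/solution.py | count_load_after_cycles
-- ===== SOURCE A (Python) =====
-- from typing import List, Tuple
--
-- def roll_rocks_to_north(platform: List[str]):
--     rolled = [list(row) for row in platform]
--     for row, line in enumerate(platform):
--         for col, block in enumerate(line):
--             if block == 'O':
--                 swap_idx = row
--                 while swap_idx > 0 and rolled[swap_idx-1][col] == '.':
--                     swap_idx -= 1
--
--                 if swap_idx != row:
--                     rolled[swap_idx][col], rolled[row][col] = 'O', '.'
--
--     return rolled
--
-- def roll_rocks_to_south(platform: List[str]):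
--     rolled = [list(row) for row in platform][::-1]
--     for row, line in enumerate(platform[::-1]):
--         for col, block in enumerate(line):
--             if block == 'O':
--                 swap_idx = row
--                 while swap_idx > 0 and rolled[swap_idx-1][col] == '.':
--                     swap_idx -= 1
--
--                 if swap_idx != row:
--                     rolled[swap_idx][col], rolled[row][col] = 'O', '.'
--
--     return rolled[::-1]
--
-- def roll_rocks_to_west(platform: List[str]):
--     rolled = [list(row) for row in platform]
--     for row, line in enumerate(platform):
--         for col, block in enumerate(line):
--             if block == 'O':
--                 swap_idx = col
--                 while swap_idx > 0 and rolled[row][swap_idx - 1] == '.':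
--                     swap_idx -= 1
--
--                 if swap_idx != col:
--                     rolled[row][swap_idx], rolled[row][col] = 'O', '.'
--
--     return rolled
--
-- def roll_rocks_to_east(platform: List[str]):
--     rolled = [list(row)[::-1] for row in platform]
--     for row, line in enumerate(platform):
--         for col, block in enumerate(line[::-1]):
--             if block == 'O':
--                 swap_idx = col
--                 while swap_idx > 0 and rolled[row][swap_idx - 1] == '.':
--                     swap_idx -= 1
--
--                 if swap_idx != col:
--                     rolled[row][swap_idx], rolled[row][col] = 'O', '.'
--
--     return [row[::-1] for row in rolled]
--
-- def count_load_after_cycles(platform: List[str], cycles: int) -> int: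
--     rolled = platform.copy()
--     saved = []
--     for i in range(cycles):
--         for roll_function in [roll_rocks_to_north, roll_rocks_to_west, roll_rocks_to_south, roll_rocks_to_east]:
--             rolled = roll_function(rolled)
--
--         if rolled in saved:
--             idx = saved.index(rolled)
--             cycle = i - idx
--             return count_load(saved[idx + (cycles - idx) % cycle - 1 ])
--         else:
--             saved.append(rolled.copy())
--
--     return count_load(rolled)
--
-- def count_load(platform: List[str]) -> int:
--     load = 0
--     for idx, line in enumerate(platform[::-1], 1):
--         load += sum(idx for block in line if block == 'O')
--
--     return load
-- ===== SOURCE B (Python) =====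
-- def _tilt(line):
--     # Pack each maximal run of '.'/'O' cells: all rocks first, then the dots;
--     # any other character is a wall that stays in place.
--     out = []
--     rocks = 0
--     space = 0
--     for c in line:
--         if c == 'O':
--             rocks += 1
--         elif c == '.':
--             space += 1
--         else:
--             out.extend('O' * rocks)
--             out.extend('.' * space)
--             out.append(c)
--             rocks = 0
--             space = 0
--     out.extend('O' * rocks)
--     out.extend('.' * space)
--     return out
--
--
-- def _cols(grid):
--     # transpose (list of rows -> list of columns)
--     return [list(c) for c in zip(*grid)]
--
--
-- def _spin(grid):
--     # north, west, south, east -- each tilt packs lines toward the wall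
--     grid = _cols([_tilt(col) for col in _cols(grid)])
--     grid = [_tilt(row) for row in grid]
--     grid = _cols([_tilt(col[::-1])[::-1] for col in _cols(grid)])
--     return [_tilt(row[::-1])[::-1] for row in grid]
--
--
-- def _load(platform):
--     n = len(platform)
--     return sum((n - i) * sum(1 for c in row if c == 'O')
--                for i, row in enumerate(platform))
--
--
-- def count_load_after_cycles(platform, cycles):
--     grid = [list(row) for row in platform]
--     saved = []
--     seen = {}
--     for i in range(cycles):
--         grid = _spin(grid)
--         key = tuple(map(tuple, grid))
--         if key in seen:
--             idx = seen[key]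
--             cycle = i - idx
--             return _load(saved[idx + (cycles - idx) % cycle - 1])
--         seen[key] = i
--         saved.append(grid)
--     return _load(grid)
-- ===== Notes on version B (the rewrite author's own statement) =====
-- stated objective: alternative
-- what changed: Each of the four per-rock gravity simulations (an O(distance) while-loop per rock) is replaced by a one-pass segment packing: every line (column via transpose for north/south, reversed for south/east) is split into maximal runs of '.'/'O' cells delimited by wall characters and rebuilt as rocks-then-dots; the cycle-detection loop keeps the same index arithmetic but looks states up in a dict instead of scanning the saved list. Pre_ keeps the natural domain of the puzzle: rectangular grids (plus the trivial inputs: no rock anywhere, or cycles <= 0); …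
-- outside the precondition, e.g. on count_load_after_cycles(['.O', '.', '#'], 5): A returns 2, B returns 0; on count_load_after_cycles(['..', 'O'], 1): A returns 1, B returns 1
import Mathlib
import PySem

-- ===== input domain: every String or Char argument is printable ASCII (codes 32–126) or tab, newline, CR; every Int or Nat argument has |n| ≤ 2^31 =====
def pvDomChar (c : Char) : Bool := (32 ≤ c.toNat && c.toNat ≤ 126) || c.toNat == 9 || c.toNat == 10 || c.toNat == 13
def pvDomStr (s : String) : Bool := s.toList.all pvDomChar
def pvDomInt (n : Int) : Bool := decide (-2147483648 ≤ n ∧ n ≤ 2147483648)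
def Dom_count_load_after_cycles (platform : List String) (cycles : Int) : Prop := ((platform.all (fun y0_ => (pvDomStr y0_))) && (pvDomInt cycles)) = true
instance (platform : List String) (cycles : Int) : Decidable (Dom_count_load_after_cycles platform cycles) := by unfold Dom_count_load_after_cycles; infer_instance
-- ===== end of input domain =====

-- B replaces the per-rock while-loop gravity simulation by a one-pass segment
-- packing of each line (via transposition for the vertical tilts) and the
-- linear scan of `saved` by a dict lookup; same results on the stated Pre_.

-- ===== PORT A =====

-- enumerate(xs) where only nonnegative indices occur (Python's enumerate)
def pvEnum {α : Type} (s : Nat) : List α → List (Nat × α)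
  | [] => []
  | x :: t => (s, x) :: pvEnum (s + 1) t

-- rolled[r][c]; the default '#' is only produced on reads Python would raise
-- on (jagged grids), which Pre_ excludes from the claim
def pvCell (g : List (List Char)) (r c : Nat) : Char := (g.getD r []).getD c '#'

-- the `while swap_idx > 0 and rolled[swap_idx-1][col] == '.'` loop of the
-- north/south rolls (structural recursion on swap_idx)
def pvFindN (roll : List (List Char)) (c : Nat) : Nat → Nat
  | 0 => 0
  | i + 1 => if pvCell roll i c = '.' then pvFindN roll c i else i + 1

-- rolled[r][c] = v
def pvSetCell (g : List (List Char)) (r c : Nat) (v : Char) : List (List Char) :=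
  g.set r ((g.getD r []).set c v)

-- body of `if block == 'O':` for the vertical rolls
def pvSlideN (roll : List (List Char)) (r c : Nat) : List (List Char) :=
  if pvFindN roll c r ≠ r then pvSetCell (pvSetCell roll (pvFindN roll c r) c 'O') r c '.' else roll

-- roll_rocks_to_north's double loop (rolled = [list(row) for row in platform] = g)
def pvNorthAux (g : List (List Char)) : List (List Char) :=
  (pvEnum 0 g).foldl (fun roll rl =>
    (pvEnum 0 rl.2).foldl (fun roll2 cb =>
      if cb.2 = 'O' then pvSlideN roll2 rl.1 cb.1 else roll2) roll) g

-- the same while loop of the west/east rolls, inside one row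
def pvFindW (s : List Char) : Nat → Nat
  | 0 => 0
  | i + 1 => if s.getD i '#' = '.' then pvFindW s i else i + 1

def pvSlideW (s : List Char) (c : Nat) : List Char :=
  if pvFindW s c ≠ c then (s.set (pvFindW s c) 'O').set c '.' else s

-- inner loop of roll_rocks_to_west on one row (the outer loop only ever
-- mutates rolled[row], so the rows are ported one by one)
def pvWestRow (r : List Char) : List Char :=
  (pvEnum 0 r).foldl (fun s cb => if cb.2 = 'O' then pvSlideW s cb.1 else s) r

def roll_rocks_to_north (p : List (List Char)) : List (List Char) := pvNorthAux p
-- roll_rocks_to_south is textually north's loop run on platform[::-1], result re-reversed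
def roll_rocks_to_south (p : List (List Char)) : List (List Char) := (pvNorthAux p.reverse).reverse
def roll_rocks_to_west (p : List (List Char)) : List (List Char) := p.map pvWestRow
-- roll_rocks_to_east is west's inner loop on each reversed row, re-reversed
def roll_rocks_to_east (p : List (List Char)) : List (List Char) :=
  p.map (fun r => (pvWestRow r.reverse).reverse)

-- sum(idx for block in line if block == 'O')
def pvCountRow (i : Int) (line : List Char) : Int :=
  line.foldl (fun s b => if b = 'O' then s + i else s) 0

-- count_load
def pvCountLoad (p : List (List Char)) : Int :=
  (PySem.List.enumerate p.reverse 1).foldl (fun load il => load + pvCountRow il.1 il.2) 0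

-- the four roll_function applications of one iteration
def pvSpinA (g : List (List Char)) : List (List Char) :=
  roll_rocks_to_east (roll_rocks_to_south (roll_rocks_to_west (roll_rocks_to_north g)))

-- the `for i in range(cycles)` loop with its early return
def pvLoopA (cycles : Int) : Nat → Int → List (List (List Char)) → List (List Char) → Int
  | 0, _, _, rolled => pvCountLoad rolled
  | f + 1, i, saved, rolled =>
    let r := pvSpinA rolled
    match PySem.List.index? saved r with
    | some n =>
        pvCountLoad ((PySem.List.pyGet? saved
          ((n : Int) + PySem.Int.mod (cycles - (n : Int)) (i - (n : Int)) - 1)).getD [])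
    | none => pvLoopA cycles f (i + 1) (saved ++ [r]) r

def count_load_after_cycles (platform : List String) (cycles : Int) : Int :=
  pvLoopA cycles cycles.toNat 0 [] (platform.map String.toList)

-- ===== PORT B =====

-- _tilt: one pass, counting rocks and dots of the current '.'/'O' run,
-- flushed (rocks first, then dots) at every wall and at the end
def pvTilt (r : List Char) : List Char :=
  let st := r.foldl (fun (a : List Char × Nat × Nat) c =>
    if c = 'O' then (a.1, a.2.1 + 1, a.2.2)
    else if c = '.' then (a.1, a.2.1, a.2.2 + 1)
    else (a.1 ++ List.replicate a.2.1 'O' ++ List.replicate a.2.2 '.' ++ [c], 0, 0))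
    ([], 0, 0)
  st.1 ++ List.replicate st.2.1 'O' ++ List.replicate st.2.2 '.'

-- zip(*grid) truncates to the shortest row
def pvMinLen : List (List Char) → Nat
  | [] => 0
  | [r] => r.length
  | r :: t => min r.length (pvMinLen t)

-- _cols (the default '#' is never read: c < length of every row)
def pvCols (g : List (List Char)) : List (List Char) :=
  (List.range (pvMinLen g)).map (fun c => g.map (fun row => row.getD c '#'))

-- _spin: north, west, south, east by segment packing
def pvSpin (g : List (List Char)) : List (List Char) :=
  let g1 := pvCols ((pvCols g).map pvTilt)
  let g2 := g1.map pvTilt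
  let g3 := pvCols ((pvCols g2).map (fun c => (pvTilt c.reverse).reverse))
  g3.map (fun r => (pvTilt r.reverse).reverse)

-- sum(1 for c in row if c == 'O')
def pvCountO (row : List Char) : Int := ((row.filter (fun c => c = 'O')).length : Int)

-- _load
def pvLoad (p : List (List Char)) : Int :=
  (pvEnum 0 p).foldl (fun s ir => s + ((p.length : Int) - (ir.1 : Int)) * pvCountO ir.2) 0

-- B's cycle loop: same index arithmetic, dict lookup instead of list scan
def pvLoopB (cycles : Int) :
    Nat → Int → List (List (List Char)) → PySem.Dict (List (List Char)) Int → List (List Char) → Int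
  | 0, _, _, _, g => pvLoad g
  | f + 1, i, saved, seen, g =>
    let g' := pvSpin g
    match seen.get? g' with
    | some idx =>
        pvLoad ((PySem.List.pyGet? saved
          (idx + PySem.Int.mod (cycles - idx) (i - idx) - 1)).getD [])
    | none => pvLoopB cycles f (i + 1) (saved ++ [g']) (seen.insert g' i) g'

def count_load_after_cycles_alt (platform : List String) (cycles : Int) : Int :=
  pvLoopB cycles cycles.toNat 0 [] PySem.Dict.empty (platform.map String.toList)

-- ===== PRECONDITION & SPEC =====

-- Pre_ keeps the natural domain of the puzzle: rectangular grids, plus the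
-- trivial inputs (no rock anywhere, or cycles ≤ 0).  Jagged grids are
-- malformed input here: on them A's per-rock probe may read a missing cell
-- and raise IndexError, so Pre_ excludes them.
def Pre_count_load_after_cycles (platform : List String) (cycles : Int) : Prop :=
  cycles ≤ 0
  ∨ (∀ s ∈ platform, s.toList.length = (platform.headD "").toList.length)
  ∨ (∀ s ∈ platform, 'O' ∉ s.toList)

instance (platform : List String) (cycles : Int) : Decidable (Pre_count_load_after_cycles platform cycles) := by
  unfold Pre_count_load_after_cycles; infer_instance

def pvWitness_count_load_after_cycles : List String × Int := (["O.", "#."], 3)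

def Spec_count_load_after_cycles (platform : List String) (cycles : Int) (out : Int) : Prop :=
  out = count_load_after_cycles_alt platform cycles
instance (platform : List String) (cycles : Int) (out : Int) : Decidable (Spec_count_load_after_cycles platform cycles out) := by
  unfold Spec_count_load_after_cycles; infer_instance

-- ===== CLAIM (what is proved, stated in full; the proofs are below) =====
def Claim_equal_count_load_after_cycles : Prop := ∀ (platform : List String) (cycles : Int), Dom_count_load_after_cycles platform cycles → Pre_count_load_after_cycles platform cycles → Spec_count_load_after_cycles platform cycles (count_load_after_cycles platform cycles)

-- ===== LEMMAS AND PROOFS =====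

-- proof-side vocabulary
def pvIsRect (w : Nat) (g : List (List Char)) : Prop := ∀ r ∈ g, r.length = w
def pvNoO (g : List (List Char)) : Prop := ∀ r ∈ g, 'O' ∉ r
def pvGetCol (c : Nat) (g : List (List Char)) : List Char := g.map (fun row => row.getD c '#')

-- the accumulator of pvTilt's fold
def pvTState (p : List Char) : List Char × Nat × Nat :=
  p.foldl (fun (a : List Char × Nat × Nat) c =>
    if c = 'O' then (a.1, a.2.1 + 1, a.2.2)
    else if c = '.' then (a.1, a.2.1, a.2.2 + 1)
    else (a.1 ++ List.replicate a.2.1 'O' ++ List.replicate a.2.2 '.' ++ [c], 0, 0))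
    ([], 0, 0)

theorem pvTilt_eq_state (p : List Char) :
    pvTilt p = (pvTState p).1 ++ List.replicate (pvTState p).2.1 'O' ++ List.replicate (pvTState p).2.2 '.' := rfl

theorem pvTState_append_O (p : List Char) :
    pvTState (p ++ ['O']) = ((pvTState p).1, (pvTState p).2.1 + 1, (pvTState p).2.2) := by
  simp [pvTState, List.foldl_append]

theorem pvTState_append_dot (p : List Char) :
    pvTState (p ++ ['.']) = ((pvTState p).1, (pvTState p).2.1, (pvTState p).2.2 + 1) := by
  simp [pvTState, List.foldl_append]

theorem pvTState_append_wall (p : List Char) (b : Char) (hO : b ≠ 'O') (hd : b ≠ '.') :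
    pvTState (p ++ [b]) = ((pvTState p).1 ++ List.replicate (pvTState p).2.1 'O' ++ List.replicate (pvTState p).2.2 '.' ++ [b], 0, 0) := by
  simp [pvTState, List.foldl_append, hO, hd]

-- out is empty or ends in a wall, and |out| + o + d = |p|
theorem pvTState_inv (p : List Char) :
    ((pvTState p).1 = [] ∨ ∃ w, (pvTState p).1.getLast? = some w ∧ w ≠ '.')
    ∧ (pvTState p).1.length + (pvTState p).2.1 + (pvTState p).2.2 = p.length := by
  induction p using List.reverseRecOn with
  | nil => simp [pvTState]
  | append_singleton p b ih =>
    by_cases hO : b = 'O'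
    · subst hO; rw [pvTState_append_O]; simpa using ⟨ih.1, by omega⟩
    · by_cases hd : b = '.'
      · subst hd; rw [pvTState_append_dot]; simpa using ⟨ih.1, by omega⟩
      · rw [pvTState_append_wall p b hO hd]
        refine ⟨Or.inr ⟨b, ?_, hd⟩, by simp; omega⟩
        simp

theorem pvTilt_length (p : List Char) : (pvTilt p).length = p.length := by
  rw [pvTilt_eq_state]; have := (pvTState_inv p).2; simp; omega

theorem pvTilt_append_not_O (p : List Char) (b : Char) (hO : b ≠ 'O') :
    pvTilt (p ++ [b]) = pvTilt p ++ [b] := by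
  by_cases hd : b = '.'
  · subst hd
    rw [pvTilt_eq_state, pvTilt_eq_state, pvTState_append_dot]
    simp [List.replicate_succ']
  · rw [pvTilt_eq_state, pvTilt_eq_state, pvTState_append_wall p b hO hd]
    simp

-- the while loop stops right after the last non-dot
theorem pvFindW_spec (u : List Char) (d : Nat) (rest : List Char)
    (hu : u = [] ∨ ∃ w, u.getLast? = some w ∧ w ≠ '.') :
    pvFindW (u ++ List.replicate d '.' ++ rest) (u.length + d) = u.length := by
  induction d generalizing rest with
  | zero =>
    rcases hu with hu | ⟨w, hw, hwd⟩
    · subst hu; simp [pvFindW]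
    · obtain ⟨u', rfl⟩ : ∃ u', u = u' ++ [w] := by
        rcases List.getLast?_eq_some_iff.mp hw with ⟨u', rfl⟩; exact ⟨u', rfl⟩
      have hlen : (u' ++ [w]).length + 0 = u'.length + 1 := by simp
      rw [hlen]
      show (if ((u' ++ [w]) ++ List.replicate 0 '.' ++ rest).getD u'.length '#' = '.' then _ else _) = _
      have hget : ((u' ++ [w]) ++ List.replicate 0 '.' ++ rest).getD u'.length '#' = w := by
        simp [List.getD_append_right, List.getD_eq_getElem?_getD]
      rw [hget, if_neg hwd]; simp
  | succ d ih =>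
    have hs : u ++ List.replicate (d + 1) '.' ++ rest = u ++ List.replicate d '.' ++ ('.' :: rest) := by
      simp [List.replicate_succ', List.append_assoc]
    have hidx : u.length + (d + 1) = (u.length + d) + 1 := by omega
    rw [hs, hidx]
    show (if (u ++ List.replicate d '.' ++ ('.' :: rest)).getD (u.length + d) '#' = '.' then _ else _) = _
    have hget : (u ++ List.replicate d '.' ++ ('.' :: rest)).getD (u.length + d) '#' = '.' := by
      rw [List.append_assoc, List.getD_append_right u _ '#' _ (by omega)]
      rw [List.getD_append_right _ _ '#' _ (by simp)]
      simp
    rw [hget, if_pos rfl]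
    exact ih ('.' :: rest)

-- the crux: one step of the west loop extends the packed prefix
theorem pvStep_eq (p : List Char) (b : Char) (rest : List Char) :
    (if b = 'O' then pvSlideW (pvTilt p ++ b :: rest) p.length else pvTilt p ++ b :: rest)
      = pvTilt (p ++ [b]) ++ rest := by
  by_cases hO : b = 'O'
  · subst hO; rw [if_pos rfl]
    obtain ⟨hlast, hlen⟩ := pvTState_inv p
    have hu : (pvTState p).1 ++ List.replicate (pvTState p).2.1 'O' = []
        ∨ ∃ w, ((pvTState p).1 ++ List.replicate (pvTState p).2.1 'O').getLast? = some w ∧ w ≠ '.' := by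
      cases ho : (pvTState p).2.1 with
      | zero => simpa using hlast
      | succ o' =>
        right
        refine ⟨'O', ?_, by decide⟩
        simp [List.getLast?_append, List.replicate_succ']
    have hs : pvTilt p ++ 'O' :: rest
        = ((pvTState p).1 ++ List.replicate (pvTState p).2.1 'O') ++ List.replicate (pvTState p).2.2 '.' ++ ('O' :: rest) := by
      rw [pvTilt_eq_state]; try simp [List.append_assoc]
    have hfind : pvFindW (pvTilt p ++ 'O' :: rest) p.length
        = ((pvTState p).1 ++ List.replicate (pvTState p).2.1 'O').length := by
      have h1 : p.length = ((pvTState p).1 ++ List.replicate (pvTState p).2.1 'O').length + (pvTState p).2.2 := by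
        simp; omega
      rw [hs, h1]
      exact pvFindW_spec _ _ _ hu
    show pvSlideW (pvTilt p ++ 'O' :: rest) p.length = _
    unfold pvSlideW
    rw [hfind]
    cases hd : (pvTState p).2.2 with
    | zero =>
      have heq : ((pvTState p).1 ++ List.replicate (pvTState p).2.1 'O').length = p.length := by
        simp; omega
      rw [heq, if_neg (by simp)]
      rw [pvTilt_eq_state, pvTilt_eq_state, pvTState_append_O, hd]
      simp [List.replicate_succ', List.append_assoc]
    | succ k =>
      have hne : ((pvTState p).1 ++ List.replicate (pvTState p).2.1 'O').length ≠ p.length := by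
        simp; omega
      rw [if_pos hne]
      have hs' : pvTilt p ++ 'O' :: rest
          = ((pvTState p).1 ++ List.replicate (pvTState p).2.1 'O') ++ ('.' :: (List.replicate k '.' ++ 'O' :: rest)) := by
        rw [hs, hd]; simp [List.replicate_succ, List.append_assoc]
      rw [hs']
      rw [List.set_append]
      rw [if_neg (by omega)]
      simp only [Nat.sub_self]
      show (((pvTState p).1 ++ List.replicate (pvTState p).2.1 'O') ++ ('O' :: (List.replicate k '.' ++ 'O' :: rest))).set p.length '.' = _
      rw [List.set_append, if_neg (by simp; omega)]
      have hoff : p.length - ((pvTState p).1 ++ List.replicate (pvTState p).2.1 'O').length = k + 1 := by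
        simp; omega
      rw [hoff]
      have hset2 : ('O' :: (List.replicate k '.' ++ 'O' :: rest)).set (k + 1) '.'
          = 'O' :: (List.replicate k '.' ++ '.' :: rest) := by
        show ('O' :: (List.replicate k '.' ++ 'O' :: rest)).set (k + 1) '.' = _
        rw [List.set_cons_succ]
        rw [List.set_append, if_neg (by simp)]
        simp
      rw [hset2]
      rw [pvTilt_eq_state, pvTState_append_O, hd]
      simp [List.replicate_succ', List.replicate_succ, List.append_assoc]
  · rw [if_neg hO, pvTilt_append_not_O p b hO]; simp

theorem pvWestRow_go (p rest : List Char) :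
    (pvEnum p.length rest).foldl (fun s cb => if cb.2 = 'O' then pvSlideW s cb.1 else s)
      (pvTilt p ++ rest) = pvTilt (p ++ rest) := by
  induction rest generalizing p with
  | nil => simp [pvEnum]
  | cons b t ih =>
    show (pvEnum (p.length + 1) t).foldl _ (if b = 'O' then pvSlideW (pvTilt p ++ b :: t) p.length else pvTilt p ++ b :: t) = _
    rw [pvStep_eq p b t]
    have hl : p.length + 1 = (p ++ [b]).length := by simp
    rw [hl, ih (p ++ [b])]
    simp

theorem pvWestRow_eq_tilt (r : List Char) : pvWestRow r = pvTilt r := by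
  have h := pvWestRow_go [] r
  simpa [pvWestRow, pvTilt] using h

-- column view
theorem pvSetGetD {α : Type} (l : List α) (n : Nat) (d : α) : l.set n (l.getD n d) = l := by
  by_cases h : n < l.length
  · rw [List.getD_eq_getElem?_getD, List.getElem?_eq_getElem h]
    simpa using List.set_getElem_self (i := n)
  · exact List.set_eq_of_length_le (by omega)

theorem pvFindW_le (s : List Char) (i : Nat) : pvFindW s i ≤ i := by
  induction i with
  | zero => simp [pvFindW]
  | succ i ih =>
    show (if s.getD i '#' = '.' then pvFindW s i else i + 1) ≤ i + 1
    split
    · omega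
    · omega

theorem pvCell_eq_getCol (g : List (List Char)) (r c : Nat) :
    pvCell g r c = (pvGetCol c g).getD r '#' := by
  simp only [pvCell, pvGetCol, List.getD_eq_getElem?_getD, List.getElem?_map]
  cases g[r]? <;> simp

theorem pvFindN_eq_findW (roll : List (List Char)) (c i : Nat) :
    pvFindN roll c i = pvFindW (pvGetCol c roll) i := by
  induction i with
  | zero => rfl
  | succ i ih =>
    show (if pvCell roll i c = '.' then pvFindN roll c i else i + 1) = _
    rw [pvCell_eq_getCol, ih]
    rfl

theorem pvGetCol_setCell_self (g : List (List Char)) (r c : Nat) (v : Char)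
    (hc : c < (g.getD r []).length) :
    pvGetCol c (pvSetCell g r c v) = (pvGetCol c g).set r v := by
  unfold pvSetCell pvGetCol
  rw [List.map_set]
  congr 1
  rw [List.getD_eq_getElem?_getD] at hc
  simp [List.getD_eq_getElem?_getD, List.getElem?_set, hc]

theorem pvGetCol_setCell_ne (g : List (List Char)) (r c c' : Nat) (v : Char) (h : c' ≠ c) :
    pvGetCol c (pvSetCell g r c' v) = pvGetCol c g := by
  unfold pvSetCell pvGetCol
  rw [List.map_set]
  have hval : ((g.getD r []).set c' v).getD c '#' = (g.getD r []).getD c '#' := by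
    simp [List.getD_eq_getElem?_getD, List.getElem?_set, h]
  rw [hval]
  have hmap : (g.getD r []).getD c '#' = (g.map (fun row => row.getD c '#')).getD r '#' := by
    simp only [List.getD_eq_getElem?_getD, List.getElem?_map]
    cases g[r]? <;> simp
  rw [hmap, pvSetGetD]

theorem pvSetCell_length (g : List (List Char)) (r c : Nat) (v : Char) :
    (pvSetCell g r c v).length = g.length := by simp [pvSetCell]

theorem pvSetCell_rect {w : Nat} (g : List (List Char)) (r c : Nat) (v : Char)
    (hg : pvIsRect w g) : pvIsRect w (pvSetCell g r c v) := by
  intro row hrow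
  by_cases hr : r < g.length
  · rcases List.mem_or_eq_of_mem_set hrow with hmem | rfl
    · exact hg _ hmem
    · have hmem : g.getD r [] ∈ g := by
        rw [List.getD_eq_getElem?_getD, List.getElem?_eq_getElem hr]
        exact List.getElem_mem hr
      simpa using hg _ hmem
  · have hid : pvSetCell g r c v = g := by
      unfold pvSetCell
      exact List.set_eq_of_length_le (by omega)
    rw [hid] at hrow
    exact hg _ hrow

theorem pvRect_getD {w : Nat} (g : List (List Char)) (hg : pvIsRect w g) (r : Nat)
    (hr : r < g.length) : (g.getD r []).length = w := by
  have hmem : g.getD r [] ∈ g := by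
    rw [List.getD_eq_getElem?_getD, List.getElem?_eq_getElem hr]
    exact List.getElem_mem hr
  exact hg _ hmem

theorem pvSlideN_length (roll : List (List Char)) (r c : Nat) :
    (pvSlideN roll r c).length = roll.length := by
  unfold pvSlideN pvSetCell
  split <;> simp

theorem pvSlideN_rect {w : Nat} (roll : List (List Char)) (r c : Nat) (h : pvIsRect w roll) :
    pvIsRect w (pvSlideN roll r c) := by
  unfold pvSlideN
  split
  · exact pvSetCell_rect _ _ _ _ (pvSetCell_rect _ _ _ _ h)
  · exact h

theorem pvGetCol_slideN_self {w : Nat} (roll : List (List Char)) (r c : Nat)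
    (hrect : pvIsRect w roll) (hc : c < w) (hr : r < roll.length) :
    pvGetCol c (pvSlideN roll r c) = pvSlideW (pvGetCol c roll) r := by
  unfold pvSlideN pvSlideW
  rw [pvFindN_eq_findW]
  by_cases hsw : pvFindW (pvGetCol c roll) r ≠ r
  · rw [if_pos hsw, if_pos hsw]
    have hswlt : pvFindW (pvGetCol c roll) r < roll.length :=
      lt_of_le_of_lt (pvFindW_le _ _) hr
    have h1 : c < (roll.getD (pvFindW (pvGetCol c roll) r) []).length := by
      rw [pvRect_getD roll hrect _ hswlt]; exact hc
    have h2 : c < ((pvSetCell roll (pvFindW (pvGetCol c roll) r) c 'O').getD r []).length := by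
      rw [pvRect_getD _ (pvSetCell_rect _ _ _ _ hrect) r (by rw [pvSetCell_length]; exact hr)]
      exact hc
    rw [pvGetCol_setCell_self _ _ _ _ h2, pvGetCol_setCell_self _ _ _ _ h1]
  · rw [if_neg hsw, if_neg hsw]

theorem pvGetCol_slideN_ne (roll : List (List Char)) (r c c' : Nat) (h : c' ≠ c) :
    pvGetCol c (pvSlideN roll r c') = pvGetCol c roll := by
  unfold pvSlideN
  split
  · rw [pvGetCol_setCell_ne _ _ _ _ _ h, pvGetCol_setCell_ne _ _ _ _ _ h]
  · rfl

-- the inner (per-line) fold, seen through one column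
theorem pvInner_shape {w : Nat} (tail : List Char) (s row : Nat) (roll : List (List Char))
    (hrect : pvIsRect w roll) :
    pvIsRect w ((pvEnum s tail).foldl (fun roll2 cb => if cb.2 = 'O' then pvSlideN roll2 row cb.1 else roll2) roll)
    ∧ ((pvEnum s tail).foldl (fun roll2 cb => if cb.2 = 'O' then pvSlideN roll2 row cb.1 else roll2) roll).length = roll.length := by
  induction tail generalizing s roll with
  | nil => exact ⟨hrect, rfl⟩
  | cons x t ih =>
    simp only [pvEnum, List.foldl_cons]
    have h1 : pvIsRect w (if x = 'O' then pvSlideN roll row s else roll) := by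
      split
      · exact pvSlideN_rect _ _ _ hrect
      · exact hrect
    have h2 : (if x = 'O' then pvSlideN roll row s else roll).length = roll.length := by
      split
      · exact pvSlideN_length _ _ _
      · rfl
    obtain ⟨ha, hb⟩ := ih (s+1) _ h1
    exact ⟨ha, by rw [hb, h2]⟩

theorem pvInner_getCol {w : Nat} (tail : List Char) (s row : Nat) (roll : List (List Char))
    (hrect : pvIsRect w roll) (hr : row < roll.length) (c : Nat) (hc : c < w) :
    pvGetCol c ((pvEnum s tail).foldl (fun roll2 cb => if cb.2 = 'O' then pvSlideN roll2 row cb.1 else roll2) roll)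
      = (if s ≤ c ∧ c < s + tail.length ∧ tail.getD (c - s) '#' = 'O'
         then pvSlideW (pvGetCol c roll) row else pvGetCol c roll) := by
  induction tail generalizing s roll with
  | nil =>
    rw [if_neg (by rintro ⟨h1', h2', _⟩; simp at h2'; omega)]
    rfl
  | cons x t ih =>
    simp only [pvEnum, List.foldl_cons]
    have h1 : pvIsRect w (if x = 'O' then pvSlideN roll row s else roll) := by
      split
      · exact pvSlideN_rect _ _ _ hrect
      · exact hrect
    have h2 : row < (if x = 'O' then pvSlideN roll row s else roll).length := by
      split
      · rw [pvSlideN_length]; exact hr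
      · exact hr
    rw [ih (s+1) _ h1 h2]
    by_cases hxc : c = s
    · subst hxc
      rw [if_neg (by omega)]
      by_cases hx : x = 'O'
      · rw [if_pos (⟨Nat.le_refl c, by simp, by simpa using hx⟩ :
          c ≤ c ∧ c < c + (x :: t).length ∧ (x :: t).getD (c - c) '#' = 'O')]
        rw [if_pos hx, pvGetCol_slideN_self roll row c hrect hc hr]
      · rw [if_neg hx, if_neg (fun hh => hx (by simpa using hh.2.2))]
    · have hgc : pvGetCol c (if x = 'O' then pvSlideN roll row s else roll) = pvGetCol c roll := by
        split
        · exact pvGetCol_slideN_ne _ _ _ _ (fun hh => hxc hh.symm)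
        · rfl
      rw [hgc]
      have hcond : (s + 1 ≤ c ∧ c < s + 1 + t.length ∧ t.getD (c - (s+1)) '#' = 'O')
          ↔ (s ≤ c ∧ c < s + (x :: t).length ∧ (x :: t).getD (c - s) '#' = 'O') := by
        constructor
        · rintro ⟨a, b, d⟩
          refine ⟨by omega, by simp; omega, ?_⟩
          have : c - s = (c - (s+1)) + 1 := by omega
          rw [this, List.getD_cons_succ]
          exact d
        · rintro ⟨a, b, d⟩
          have hs1 : s + 1 ≤ c := by omega
          refine ⟨hs1, by simp at b; omega, ?_⟩
          have : c - s = (c - (s+1)) + 1 := by omega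
          rw [this, List.getD_cons_succ] at d
          exact d
      by_cases hfull : s ≤ c ∧ c < s + (x :: t).length ∧ (x :: t).getD (c - s) '#' = 'O'
      · rw [if_pos (hcond.mpr hfull), if_pos hfull]
      · rw [if_neg (fun hh => hfull (hcond.mp hh)), if_neg hfull]

-- the outer fold, seen through one column
theorem pvEnum_map {α β : Type} (f : α → β) (s : Nat) (l : List α) :
    pvEnum s (l.map f) = (pvEnum s l).map (fun p => (p.1, f p.2)) := by
  induction l generalizing s with
  | nil => simp [pvEnum]
  | cons x t ih => simp [pvEnum, ih]

theorem pvOuter_shape {w : Nat} (rows : List (List Char)) (s : Nat) (roll : List (List Char))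
    (hrect : pvIsRect w roll) :
    pvIsRect w ((pvEnum s rows).foldl (fun roll rl =>
        (pvEnum 0 rl.2).foldl (fun roll2 cb => if cb.2 = 'O' then pvSlideN roll2 rl.1 cb.1 else roll2) roll) roll)
    ∧ ((pvEnum s rows).foldl (fun roll rl =>
        (pvEnum 0 rl.2).foldl (fun roll2 cb => if cb.2 = 'O' then pvSlideN roll2 rl.1 cb.1 else roll2) roll) roll).length = roll.length := by
  induction rows generalizing s roll with
  | nil => exact ⟨hrect, rfl⟩
  | cons r0 rt ih =>
    simp only [pvEnum, List.foldl_cons]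
    obtain ⟨h1, h2⟩ := pvInner_shape r0 0 s roll hrect
    obtain ⟨ha, hb⟩ := ih (s+1) _ h1
    exact ⟨ha, by rw [hb, h2]⟩

theorem pvOuter_getCol {w : Nat} (rows : List (List Char)) (s : Nat) (roll : List (List Char))
    (hrect : pvIsRect w roll) (hlen : s + rows.length ≤ roll.length)
    (hrows : ∀ r ∈ rows, r.length = w) (c : Nat) (hc : c < w) :
    pvGetCol c ((pvEnum s rows).foldl (fun roll rl =>
        (pvEnum 0 rl.2).foldl (fun roll2 cb => if cb.2 = 'O' then pvSlideN roll2 rl.1 cb.1 else roll2) roll) roll)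
      = (pvEnum s rows).foldl (fun sc rl => if rl.2.getD c '#' = 'O' then pvSlideW sc rl.1 else sc) (pvGetCol c roll) := by
  induction rows generalizing s roll with
  | nil => rfl
  | cons r0 rt ih =>
    simp only [pvEnum, List.foldl_cons]
    have hr0 : r0.length = w := hrows r0 (by simp)
    have hs : s < roll.length := by simp at hlen; omega
    have hin := pvInner_getCol r0 0 s roll hrect hs c hc
    have hcond : (0 ≤ c ∧ c < 0 + r0.length ∧ r0.getD (c - 0) '#' = 'O') ↔ r0.getD c '#' = 'O' := by
      constructor
      · rintro ⟨_, _, h⟩; simpa using h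
      · intro h; exact ⟨Nat.zero_le c, by omega, by simpa using h⟩
    obtain ⟨h1, h2⟩ := pvInner_shape r0 0 s roll hrect
    rw [ih (s+1) _ h1 (by simp at hlen ⊢; omega) (fun r hr => hrows r (by simp [hr]))]
    congr 1
    rw [hin]
    by_cases hx : r0.getD c '#' = 'O'
    · rw [if_pos (hcond.mpr hx), if_pos hx]
    · rw [if_neg (fun hh => hx (hcond.mp hh)), if_neg hx]

theorem pvNorthAux_getCol {w : Nat} (g : List (List Char)) (hrect : pvIsRect w g) (c : Nat) (hc : c < w) :
    pvGetCol c (pvNorthAux g) = pvWestRow (pvGetCol c g) := by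
  have h := pvOuter_getCol g 0 g hrect (by omega) hrect c hc
  unfold pvNorthAux
  rw [h]
  unfold pvWestRow pvGetCol
  rw [pvEnum_map, List.foldl_map]

theorem pvNorthAux_shape {w : Nat} (g : List (List Char)) (hrect : pvIsRect w g) :
    pvIsRect w (pvNorthAux g) ∧ (pvNorthAux g).length = g.length := by
  exact pvOuter_shape g 0 g hrect

-- ext / zipT facts
theorem pvListExtGetD {α : Type} (d : α) (l1 l2 : List α) (hl : l1.length = l2.length)
    (h : ∀ i < l1.length, l1.getD i d = l2.getD i d) : l1 = l2 := by
  induction l1 generalizing l2 with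
  | nil => cases l2 with
    | nil => rfl
    | cons b t2 => simp at hl
  | cons a t1 ih =>
    cases l2 with
    | nil => simp at hl
    | cons b t2 =>
      have h0 := h 0 (by simp)
      simp at h0
      have ht := ih t2 (by simpa using hl) (fun i hi => by simpa using h (i+1) (by simpa using hi))
      rw [h0, ht]

theorem pvRangeMapGetD {α : Type} (F : Nat → α) (w c : Nat) (hc : c < w) (d : α) :
    ((List.range w).map F).getD c d = F c := by
  rw [List.getD_eq_getElem?_getD, List.getElem?_map, List.getElem?_range hc]
  rfl

theorem pvRevGetD {α : Type} (l : List α) (i : Nat) (hi : i < l.length) (d : α) :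
    l.reverse.getD i d = l.getD (l.length - 1 - i) d := by
  exact congrFun (List.getD_reverse i hi) d

theorem pvMinLen_rect {w : Nat} (g : List (List Char)) (hrect : pvIsRect w g) (hne : g ≠ []) :
    pvMinLen g = w := by
  induction g with
  | nil => exact absurd rfl hne
  | cons r t ih =>
    cases t with
    | nil => simpa [pvMinLen] using hrect r (by simp)
    | cons r2 t2 =>
      have heq : pvMinLen (r :: r2 :: t2) = min r.length (pvMinLen (r2 :: t2)) := rfl
      rw [heq, ih (fun x hx => hrect x (List.mem_cons_of_mem _ hx)) (by simp)]
      rw [hrect r (by simp)]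
      simp

theorem pvCols_rect_eq {w : Nat} (g : List (List Char)) (hrect : pvIsRect w g) (hne : g ≠ []) :
    pvCols g = (List.range w).map (fun c => pvGetCol c g) := by
  unfold pvCols pvGetCol
  rw [pvMinLen_rect g hrect hne]

theorem pvGetCol_length (c : Nat) (g : List (List Char)) : (pvGetCol c g).length = g.length := by
  simp [pvGetCol]

theorem pvGetCol_getD (c : Nat) (g : List (List Char)) (r : Nat) :
    (pvGetCol c g).getD r '#' = (g.getD r []).getD c '#' := by
  rw [← pvCell_eq_getCol]
  rfl

-- north tilt agreement on nonempty rectangles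
theorem pvNorth_eq {w : Nat} (g : List (List Char)) (hrect : pvIsRect w g)
    (hg : g ≠ []) (hw : 0 < w) :
    pvNorthAux g = pvCols ((pvCols g).map pvTilt) := by
  have hh : 0 < g.length := List.length_pos_iff.mpr hg
  have hX : (pvCols g).map pvTilt = (List.range w).map (fun c => pvTilt (pvGetCol c g)) := by
    rw [pvCols_rect_eq g hrect hg, List.map_map]
    rfl
  have hXrect : pvIsRect g.length ((pvCols g).map pvTilt) := by
    rw [hX]
    intro r hr
    simp only [List.mem_map, List.mem_range] at hr
    obtain ⟨c, hc, rfl⟩ := hr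
    rw [pvTilt_length, pvGetCol_length]
  have hXne : (pvCols g).map pvTilt ≠ [] := by
    rw [hX]
    simp [List.map_eq_nil_iff, List.range_eq_nil]
    omega
  obtain ⟨hNrect, hNlen⟩ := pvNorthAux_shape g hrect
  apply pvListExtGetD ([] : List Char)
  · rw [hNlen, pvCols_rect_eq _ hXrect hXne]
    simp
  · intro r hr
    rw [hNlen] at hr
    rw [pvCols_rect_eq _ hXrect hXne, pvRangeMapGetD _ _ _ hr]
    apply pvListExtGetD ('#' : Char)
    · rw [pvRect_getD _ hNrect r (by omega)]
      rw [pvGetCol_length, hX]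
      simp
    · intro c hc
      rw [pvRect_getD _ hNrect r (by omega)] at hc
      rw [← pvGetCol_getD, pvNorthAux_getCol g hrect c hc, pvWestRow_eq_tilt]
      rw [pvGetCol_getD, hX, pvRangeMapGetD (fun c => pvTilt (pvGetCol c g)) w c hc ([] : List Char)]

theorem pvGetCol_reverse (c : Nat) (g : List (List Char)) :
    pvGetCol c g.reverse = (pvGetCol c g).reverse := by
  simp [pvGetCol]

-- (cols M).reverse = cols (map reverse M) on rectangles
theorem pvCols_reverse {h : Nat} (M : List (List Char)) (hrect : pvIsRect h M)
    (hM : M ≠ []) (hh : 0 < h) :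
    (pvCols M).reverse = pvCols (M.map List.reverse) := by
  have hM2 : pvIsRect h (M.map List.reverse) := by
    intro r hr
    simp only [List.mem_map] at hr
    obtain ⟨y, hy, rfl⟩ := hr
    simpa using hrect y hy
  have hM2ne : M.map List.reverse ≠ [] := by simpa using hM
  apply pvListExtGetD ([] : List Char)
  · rw [List.length_reverse, pvCols_rect_eq _ hrect hM, pvCols_rect_eq _ hM2 hM2ne]
    simp
  · intro r hr
    rw [List.length_reverse, pvCols_rect_eq _ hrect hM] at hr
    simp only [List.length_map, List.length_range] at hr
    have hlen : (pvCols M).length = h := by rw [pvCols_rect_eq _ hrect hM]; simp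
    rw [pvRevGetD _ r (by rw [hlen]; exact hr), hlen]
    rw [pvCols_rect_eq _ hrect hM, pvCols_rect_eq _ hM2 hM2ne]
    rw [pvRangeMapGetD _ _ _ (by omega), pvRangeMapGetD _ _ _ hr]
    unfold pvGetCol
    rw [List.map_map]
    apply List.map_congr_left
    intro y hy
    show y.getD (h - 1 - r) '#' = y.reverse.getD r '#'
    rw [pvRevGetD y r (by rw [hrect y hy]; exact hr), hrect y hy]

theorem pvSouth_eq {w : Nat} (g : List (List Char)) (hrect : pvIsRect w g)
    (hg : g ≠ []) (hw : 0 < w) :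
    (pvNorthAux g.reverse).reverse = pvCols ((pvCols g).map (fun c => (pvTilt c.reverse).reverse)) := by
  have hh : 0 < g.length := List.length_pos_iff.mpr hg
  have hrev : pvIsRect w g.reverse := fun r hr => hrect r (by simpa using hr)
  have hrevne : g.reverse ≠ [] := by simpa using hg
  rw [pvNorth_eq g.reverse hrev hrevne hw]
  have hY : (pvCols g.reverse).map pvTilt = (List.range w).map (fun c => pvTilt (pvGetCol c g).reverse) := by
    rw [pvCols_rect_eq _ hrev hrevne, List.map_map]
    apply List.map_congr_left
    intro c hc
    show pvTilt (pvGetCol c g.reverse) = _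
    rw [pvGetCol_reverse]
  rw [hY]
  have hYrect : pvIsRect g.length ((List.range w).map (fun c => pvTilt (pvGetCol c g).reverse)) := by
    intro r hr
    simp only [List.mem_map, List.mem_range] at hr
    obtain ⟨c, hc, rfl⟩ := hr
    rw [pvTilt_length]
    simp [pvGetCol_length]
  have hYne : (List.range w).map (fun c => pvTilt (pvGetCol c g).reverse) ≠ [] := by
    simp [List.map_eq_nil_iff, List.range_eq_nil]
    omega
  rw [pvCols_reverse _ hYrect hYne hh, List.map_map]
  rw [pvCols_rect_eq g hrect hg, List.map_map]
  rfl

-- whole-spin agreement and shape preservation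
theorem pvSpin_eq {w : Nat} (g : List (List Char)) (hrect : pvIsRect w g)
    (hg : g ≠ []) (hw : 0 < w) :
    pvSpinA g = pvSpin g ∧ pvIsRect w (pvSpinA g) ∧ (pvSpinA g).length = g.length := by
  have hh : 0 < g.length := List.length_pos_iff.mpr hg
  -- north
  obtain ⟨hNrect, hNlen⟩ := pvNorthAux_shape g hrect
  have hN : roll_rocks_to_north g = pvCols ((pvCols g).map pvTilt) := pvNorth_eq g hrect hg hw
  have hNne : roll_rocks_to_north g ≠ [] := by
    unfold roll_rocks_to_north
    intro hnil
    rw [hnil] at hNlen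
    simp at hNlen
    omega
  -- west
  have hW : roll_rocks_to_west (roll_rocks_to_north g) = (roll_rocks_to_north g).map pvTilt := by
    unfold roll_rocks_to_west
    exact List.map_congr_left (fun r _ => pvWestRow_eq_tilt r)
  have hWrect : pvIsRect w ((roll_rocks_to_north g).map pvTilt) := by
    intro r hr
    simp only [List.mem_map] at hr
    obtain ⟨y, hy, rfl⟩ := hr
    rw [pvTilt_length]
    exact hNrect y hy
  have hWlen : ((roll_rocks_to_north g).map pvTilt).length = g.length := by
    rw [List.length_map]
    exact hNlen
  have hWne : (roll_rocks_to_north g).map pvTilt ≠ [] := by simpa using hNne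
  -- south
  have hS : roll_rocks_to_south ((roll_rocks_to_north g).map pvTilt)
      = pvCols ((pvCols ((roll_rocks_to_north g).map pvTilt)).map (fun c => (pvTilt c.reverse).reverse)) :=
    pvSouth_eq _ hWrect hWne hw
  have hSrect : pvIsRect w (roll_rocks_to_south ((roll_rocks_to_north g).map pvTilt)) := by
    unfold roll_rocks_to_south
    intro r hr
    simp only [List.mem_reverse] at hr
    exact (pvNorthAux_shape _ (fun x hx => hWrect x (by simpa using hx))).1 r hr
  have hSlen : (roll_rocks_to_south ((roll_rocks_to_north g).map pvTilt)).length = g.length := by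
    unfold roll_rocks_to_south
    rw [List.length_reverse, (pvNorthAux_shape _ (fun x hx => hWrect x (by simpa using hx))).2,
      List.length_reverse, hWlen]
  -- east
  have hE : ∀ (q : List (List Char)), roll_rocks_to_east q = q.map (fun r => (pvTilt r.reverse).reverse) := by
    intro q
    unfold roll_rocks_to_east
    exact List.map_congr_left (fun r _ => by rw [pvWestRow_eq_tilt])
  have hErect : pvIsRect w (pvSpinA g) := by
    unfold pvSpinA
    rw [hE]
    intro r hr
    simp only [List.mem_map] at hr
    obtain ⟨y, hy, rfl⟩ := hr
    rw [List.length_reverse, pvTilt_length, List.length_reverse]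
    rw [hW] at hy
    exact hSrect y hy
  have hElen : (pvSpinA g).length = g.length := by
    unfold pvSpinA
    rw [hE, List.length_map, hW]
    exact hSlen
  refine ⟨?_, hErect, hElen⟩
  unfold pvSpinA pvSpin
  rw [hW, hS, hE, hN]

-- load agreement: both count_loads are Σ (n - i) · #O(row i)
def pvWSum : List (List Char) → Int
  | [] => 0
  | r :: t => ((t.length : Int) + 1) * pvCountO r + pvWSum t

def pvTot : List (List Char) → Int
  | [] => 0
  | r :: t => pvCountO r + pvTot t

def pvS (s : Int) : List (List Char) → Int
  | [] => 0
  | r :: t => s * pvCountO r + pvS (s + 1) t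

theorem pvCountO_cons (b : Char) (t : List Char) :
    pvCountO (b :: t) = (if b = 'O' then 1 else 0) + pvCountO t := by
  by_cases hb : b = 'O' <;> simp [pvCountO, List.filter_cons, hb] <;> push_cast <;> ring

theorem pvCountRow_eq (i : Int) (line : List Char) : pvCountRow i line = i * pvCountO line := by
  have key : ∀ (l : List Char) (a : Int),
      l.foldl (fun s b => if b = 'O' then s + i else s) a = a + i * pvCountO l := by
    intro l
    induction l with
    | nil => intro a; simp [pvCountO]
    | cons b t ih =>
      intro a
      by_cases hb : b = 'O' <;> simp [List.foldl_cons, hb, ih, pvCountO_cons] <;> ring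
  have := key line 0
  simpa [pvCountRow] using this

theorem pvS_fold (rows : List (List Char)) (s : Int) (acc : Int) :
    (PySem.List.enumerate rows s).foldl (fun load il => load + pvCountRow il.1 il.2) acc
      = acc + pvS s rows := by
  induction rows generalizing s acc with
  | nil => simp [PySem.List.enumerate_nil, pvS]
  | cons r t ih =>
    rw [PySem.List.enumerate_cons]
    simp only [List.foldl_cons]
    rw [ih]
    rw [pvCountRow_eq]
    show acc + s * pvCountO r + pvS (s + 1) t = acc + (s * pvCountO r + pvS (s + 1) t)
    ring

theorem pvS_append_singleton (q : List (List Char)) (r : List Char) (s : Int) :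
    pvS s (q ++ [r]) = pvS s q + (s + q.length) * pvCountO r := by
  induction q generalizing s with
  | nil => simp [pvS]
  | cons a t ih =>
    show s * pvCountO a + pvS (s + 1) (t ++ [r]) = _
    rw [ih (s + 1)]
    show _ = s * pvCountO a + pvS (s + 1) t + (s + (t.length + 1)) * pvCountO r
    push_cast
    ring

theorem pvS_reverse (p : List (List Char)) (s : Int) :
    pvS s p.reverse = pvWSum p + (s - 1) * pvTot p := by
  induction p generalizing s with
  | nil => simp [pvS, pvWSum, pvTot]
  | cons r t ih =>
    rw [List.reverse_cons, pvS_append_singleton, ih]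
    show _ = ((t.length : Int) + 1) * pvCountO r + pvWSum t + (s - 1) * (pvCountO r + pvTot t)
    rw [List.length_reverse]
    ring

theorem pvCountLoad_eq_wsum (p : List (List Char)) : pvCountLoad p = pvWSum p := by
  unfold pvCountLoad
  rw [pvS_fold]
  rw [pvS_reverse]
  ring

def pvT (n : Int) (s : Nat) : List (List Char) → Int
  | [] => 0
  | r :: t => (n - s) * pvCountO r + pvT n (s + 1) t

theorem pvT_fold (n : Int) (t : List (List Char)) (s : Nat) (acc : Int) :
    (pvEnum s t).foldl (fun a ir => a + (n - (ir.1 : Int)) * pvCountO ir.2) acc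
      = acc + pvT n s t := by
  induction t generalizing s acc with
  | nil => simp [pvEnum, pvT]
  | cons r q ih =>
    simp only [pvEnum, List.foldl_cons]
    rw [ih]
    show acc + (n - s) * pvCountO r + pvT n (s + 1) q = acc + ((n - s) * pvCountO r + pvT n (s + 1) q)
    ring

theorem pvT_eq (n : Int) (t : List (List Char)) (s : Nat) :
    pvT n s t = pvWSum t + (n - s - t.length) * pvTot t := by
  induction t generalizing s with
  | nil => simp [pvT, pvWSum, pvTot]
  | cons r q ih =>
    show (n - s) * pvCountO r + pvT n (s + 1) q = _
    rw [ih (s + 1)]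
    show _ = ((q.length : Int) + 1) * pvCountO r + pvWSum q + (n - s - (q.length + 1)) * (pvCountO r + pvTot q)
    push_cast
    ring

theorem pvLoad_eq_wsum (p : List (List Char)) : pvLoad p = pvWSum p := by
  unfold pvLoad
  rw [pvT_fold]
  rw [pvT_eq]
  simp

theorem pvLoad_eq_countLoad (p : List (List Char)) : pvCountLoad p = pvLoad p := by
  rw [pvCountLoad_eq_wsum, pvLoad_eq_wsum]

-- loop agreement in the rectangular case
theorem pvLoop_eq {w : Nat} (cycles : Int) (fuel : Nat)
    (saved : List (List (List Char))) (seen : PySem.Dict (List (List Char)) Int)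
    (g : List (List Char)) (hrect : pvIsRect w g) (hg : g ≠ []) (hw : 0 < w)
    (hsize : ∀ s ∈ saved, pvIsRect w s ∧ s ≠ [])
    (hseen : ∀ x, seen.get? x = (PySem.List.index? saved x).map (fun n => (n : Int))) :
    pvLoopA cycles fuel (saved.length : Int) saved g = pvLoopB cycles fuel (saved.length : Int) saved seen g := by
  induction fuel generalizing saved seen g with
  | zero => exact pvLoad_eq_countLoad g
  | succ f ih =>
    obtain ⟨hsp, hsprect, hsplen⟩ := pvSpin_eq g hrect hg hw
    have hspne : pvSpin g ≠ [] := by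
      rw [← hsp]
      intro hnil
      rw [hnil] at hsplen
      simp at hsplen
      exact hg (List.length_eq_zero_iff.mp hsplen.symm)
    have hsprect' : pvIsRect w (pvSpin g) := by rw [← hsp]; exact hsprect
    show (match PySem.List.index? saved (pvSpinA g) with
      | some n => pvCountLoad ((PySem.List.pyGet? saved
          ((n : Int) + PySem.Int.mod (cycles - (n : Int)) ((saved.length : Int) - (n : Int)) - 1)).getD [])
      | none => pvLoopA cycles f ((saved.length : Int) + 1) (saved ++ [pvSpinA g]) (pvSpinA g))
      = (match seen.get? (pvSpin g) with
      | some idx => pvLoad ((PySem.List.pyGet? saved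
          (idx + PySem.Int.mod (cycles - idx) ((saved.length : Int) - idx) - 1)).getD [])
      | none => pvLoopB cycles f ((saved.length : Int) + 1) (saved ++ [pvSpin g]) (seen.insert (pvSpin g) (saved.length : Int)) (pvSpin g))
    rw [hsp, hseen (pvSpin g)]
    cases hidx : PySem.List.index? saved (pvSpin g) with
    | some n =>
      simp only [Option.map_some]
      exact pvLoad_eq_countLoad _
    | none =>
      simp only [Option.map_none]
      have hnotmem : pvSpin g ∉ saved := (PySem.List.index?_eq_none_iff saved (pvSpin g)).mp hidx
      have hsize' : ∀ s ∈ saved ++ [pvSpin g], pvIsRect w s ∧ s ≠ [] := by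
        intro s hs
        rcases List.mem_append.mp hs with hs | hs
        · exact hsize s hs
        · simp at hs
          subst hs
          exact ⟨hsprect', hspne⟩
      have hseen' : ∀ x, (seen.insert (pvSpin g) (saved.length : Int)).get? x
          = (PySem.List.index? (saved ++ [pvSpin g]) x).map (fun n => (n : Int)) := by
        intro x
        by_cases hx : x = pvSpin g
        · subst hx
          rw [PySem.Dict.get?_insert_self]
          rw [PySem.List.index?_append_singleton_self saved _ hnotmem]
          simp
        · rw [PySem.Dict.get?_insert_of_ne seen _ hx]
          by_cases hmem : x ∈ saved
          · rw [PySem.List.index?_append_of_mem [pvSpin g] hmem, hseen x]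
          · rw [hseen x, (PySem.List.index?_eq_none_iff saved x).mpr hmem]
            rw [(PySem.List.index?_eq_none_iff (saved ++ [pvSpin g]) x).mpr (by
              intro hin
              rcases List.mem_append.mp hin with h1 | h1
              · exact hmem h1
              · simp at h1; exact hx h1)]
      have hlen' : ((saved ++ [pvSpin g]).length : Int) = (saved.length : Int) + 1 := by
        simp
      have := ih (saved ++ [pvSpin g]) (seen.insert (pvSpin g) (saved.length : Int)) (pvSpin g)
        hsprect' hspne hsize' hseen'
      rw [hlen'] at this
      exact this

-- the no-rock case: every reachable state has no 'O', both sides count 0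
theorem pvCountO_noO (r : List Char) (h : 'O' ∉ r) : pvCountO r = 0 := by
  induction r with
  | nil => rfl
  | cons b t ih =>
    rw [pvCountO_cons, if_neg (fun hb => h (by simp [hb])), ih (fun ht => h (by simp [ht]))]
    ring

theorem pvWSum_noO (p : List (List Char)) (h : pvNoO p) : pvWSum p = 0 := by
  induction p with
  | nil => rfl
  | cons r t ih =>
    show ((t.length : Int) + 1) * pvCountO r + pvWSum t = 0
    rw [pvCountO_noO r (h r (by simp)), ih (fun x hx => h x (by simp [hx]))]
    ring

theorem pvCountLoad_noO (p : List (List Char)) (h : pvNoO p) : pvCountLoad p = 0 := by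
  rw [pvCountLoad_eq_wsum]
  exact pvWSum_noO p h

theorem pvLoad_noO (p : List (List Char)) (h : pvNoO p) : pvLoad p = 0 := by
  rw [pvLoad_eq_wsum]
  exact pvWSum_noO p h

theorem pvEnum_snd_mem {α : Type} {q : Nat × α} {s : Nat} {l : List α}
    (hq : q ∈ pvEnum s l) : q.2 ∈ l := by
  induction l generalizing s with
  | nil => simp [pvEnum] at hq
  | cons x t ih =>
    simp only [pvEnum, List.mem_cons] at hq
    rcases hq with rfl | hq
    · simp
    · exact List.mem_cons_of_mem _ (ih hq)

theorem pvNoOpFold {α : Type} (l : List (Nat × Char)) (f : α → Nat → α) (a : α)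
    (h : ∀ q ∈ l, q.2 ≠ 'O') :
    l.foldl (fun s cb => if cb.2 = 'O' then f s cb.1 else s) a = a := by
  induction l generalizing a with
  | nil => rfl
  | cons q t ih =>
    rw [List.foldl_cons, if_neg (h q (by simp))]
    exact ih a (fun q' hq' => h q' (List.mem_cons_of_mem _ hq'))

theorem pvWestRow_noO (r : List Char) (h : 'O' ∉ r) : pvWestRow r = r := by
  unfold pvWestRow
  exact pvNoOpFold _ _ _ (fun q hq heq => h (heq ▸ pvEnum_snd_mem hq))

theorem pvNorthAux_noO (g : List (List Char)) (h : pvNoO g) : pvNorthAux g = g := by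
  unfold pvNorthAux
  have key : ∀ (l : List (Nat × List Char)) (roll : List (List Char)),
      (∀ q ∈ l, 'O' ∉ q.2) →
      l.foldl (fun roll rl => (pvEnum 0 rl.2).foldl
        (fun roll2 cb => if cb.2 = 'O' then pvSlideN roll2 rl.1 cb.1 else roll2) roll) roll = roll := by
    intro l
    induction l with
    | nil => intro roll _; rfl
    | cons q t ih =>
      intro roll hl
      rw [List.foldl_cons]
      rw [pvNoOpFold _ _ _ (fun q' hq' heq => hl q (by simp) (heq ▸ pvEnum_snd_mem hq'))]
      exact ih roll (fun q' hq' => hl q' (List.mem_cons_of_mem _ hq'))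
  exact key _ g (fun q hq => h q.2 (pvEnum_snd_mem hq))

theorem pvSpinA_noO (g : List (List Char)) (h : pvNoO g) : pvSpinA g = g := by
  unfold pvSpinA
  have hrev : pvNoO g.reverse := fun r hr => h r (by simpa using hr)
  have hN : roll_rocks_to_north g = g := pvNorthAux_noO g h
  have hW : roll_rocks_to_west g = g := by
    unfold roll_rocks_to_west
    rw [List.map_congr_left (fun r hr => pvWestRow_noO r (h r hr))]
    exact List.map_id' g
  have hS : roll_rocks_to_south g = g := by
    unfold roll_rocks_to_south
    rw [pvNorthAux_noO g.reverse hrev, List.reverse_reverse]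
  have hEE : roll_rocks_to_east g = g := by
    unfold roll_rocks_to_east
    have : ∀ r ∈ g, (pvWestRow r.reverse).reverse = id r := by
      intro r hr
      rw [pvWestRow_noO r.reverse (fun hm => h r hr (by simpa using hm)), List.reverse_reverse]
      rfl
    rw [List.map_congr_left this]
    exact List.map_id' g
  rw [hN, hW, hS, hEE]

theorem pvTilt_noO (r : List Char) (h : 'O' ∉ r) : 'O' ∉ pvTilt r := by
  induction r using List.reverseRecOn with
  | nil => simp [pvTilt]
  | append_singleton p b ih =>
    have hb : b ≠ 'O' := fun hb => h (by simp [hb])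
    have hp : 'O' ∉ p := fun hp => h (by simp [hp])
    rw [pvTilt_append_not_O p b hb]
    intro hin
    rcases List.mem_append.mp hin with h1 | h1
    · exact ih hp h1
    · simp at h1; exact hb h1.symm

theorem pvGetD_mem {α : Type} (l : List α) (n : Nat) (d : α) :
    l.getD n d ∈ l ∨ l.getD n d = d := by
  by_cases hn : n < l.length
  · left
    rw [List.getD_eq_getElem?_getD, List.getElem?_eq_getElem hn]
    exact List.getElem_mem hn
  · right
    rw [List.getD_eq_getElem?_getD, List.getElem?_eq_none (by omega)]
    rfl

theorem pvCols_noO (g : List (List Char)) (h : pvNoO g) : pvNoO (pvCols g) := by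
  intro r hr
  unfold pvCols at hr
  simp only [List.mem_map, List.mem_range] at hr
  obtain ⟨c, _, rfl⟩ := hr
  intro hin
  simp only [List.mem_map] at hin
  obtain ⟨row, hrow, heq⟩ := hin
  rcases pvGetD_mem row c '#' with hm | hd
  · rw [heq] at hm
    exact h row hrow hm
  · rw [heq] at hd
    simp at hd

theorem pvMapTilt_noO (g : List (List Char)) (h : pvNoO g) : pvNoO (g.map pvTilt) := by
  intro r hr
  simp only [List.mem_map] at hr
  obtain ⟨y, hy, rfl⟩ := hr
  exact pvTilt_noO y (h y hy)

theorem pvMapTiltRev_noO (g : List (List Char)) (h : pvNoO g) :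
    pvNoO (g.map (fun c => (pvTilt c.reverse).reverse)) := by
  intro r hr
  simp only [List.mem_map] at hr
  obtain ⟨y, hy, rfl⟩ := hr
  intro hin
  exact pvTilt_noO y.reverse (fun hm => h y hy (by simpa using hm)) (by simpa using hin)

theorem pvSpin_noO (g : List (List Char)) (h : pvNoO g) : pvNoO (pvSpin g) := by
  unfold pvSpin
  exact pvMapTiltRev_noO _ (pvCols_noO _ (pvMapTiltRev_noO _ (pvCols_noO _
    (pvMapTilt_noO _ (pvCols_noO _ (pvMapTilt_noO _ (pvCols_noO _ h)))))))

theorem pvLoopA_noO (cycles : Int) (fuel : Nat) (g : List (List Char)) (h : pvNoO g) :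
    pvLoopA cycles fuel 0 [] g = 0 := by
  have hspin : pvSpinA g = g := pvSpinA_noO g h
  match fuel with
  | 0 => exact pvCountLoad_noO g h
  | 1 =>
    show (match PySem.List.index? [] (pvSpinA g) with
      | some n => pvCountLoad ((PySem.List.pyGet? [] ((n : Int) + PySem.Int.mod (cycles - (n : Int)) ((0:Int) - (n : Int)) - 1)).getD [])
      | none => pvLoopA cycles 0 ((0:Int) + 1) ([] ++ [pvSpinA g]) (pvSpinA g)) = 0
    rw [hspin]
    show pvLoopA cycles 0 ((0:Int)+1) [g] g = 0
    exact pvCountLoad_noO g h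
  | (f + 2) =>
    show (match PySem.List.index? [] (pvSpinA g) with
      | some n => pvCountLoad ((PySem.List.pyGet? [] ((n : Int) + PySem.Int.mod (cycles - (n : Int)) ((0:Int) - (n : Int)) - 1)).getD [])
      | none => pvLoopA cycles (f+1) ((0:Int) + 1) ([] ++ [pvSpinA g]) (pvSpinA g)) = 0
    rw [hspin]
    show (match PySem.List.index? [g] (pvSpinA g) with
      | some n => pvCountLoad ((PySem.List.pyGet? [g] ((n : Int) + PySem.Int.mod (cycles - (n : Int)) (((0:Int)+1) - (n : Int)) - 1)).getD [])
      | none => pvLoopA cycles f (((0:Int)+1) + 1) ([g] ++ [pvSpinA g]) (pvSpinA g)) = 0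
    rw [hspin, PySem.List.index?_cons_self]
    show pvCountLoad ((PySem.List.pyGet? [g] (((0:Nat) : Int) + PySem.Int.mod (cycles - ((0:Nat) : Int)) (((0:Int)+1) - ((0:Nat):Int)) - 1)).getD []) = 0
    have hmod : PySem.Int.mod (cycles - ((0:Nat) : Int)) (((0:Int)+1) - ((0:Nat):Int)) = 0 := by
      rw [show (cycles - ((0:Nat):Int)) = cycles by norm_num,
        show ((0:Int)+1) - ((0:Nat):Int) = 1 by norm_num]
      rw [PySem.Int.mod_eq_zero_iff_dvd]
      exact one_dvd _
    rw [hmod]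
    rw [show ((0:Nat):Int) + 0 - 1 = (-1 : Int) by norm_num]
    rw [PySem.List.pyGet?_neg_one]
    show pvCountLoad (([g].getLast?).getD []) = 0
    simp only [List.getLast?_singleton, Option.getD_some]
    exact pvCountLoad_noO g h

theorem pvLoopB_noO (cycles : Int) (fuel : Nat) (i : Int)
    (saved : List (List (List Char))) (seen : PySem.Dict (List (List Char)) Int)
    (g : List (List Char)) (h : pvNoO g) (hs : ∀ s ∈ saved, pvNoO s) :
    pvLoopB cycles fuel i saved seen g = 0 := by
  induction fuel generalizing i saved seen g with
  | zero => exact pvLoad_noO g h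
  | succ f ih =>
    have hsp : pvNoO (pvSpin g) := pvSpin_noO g h
    show (match seen.get? (pvSpin g) with
      | some idx => pvLoad ((PySem.List.pyGet? saved (idx + PySem.Int.mod (cycles - idx) (i - idx) - 1)).getD [])
      | none => pvLoopB cycles f (i + 1) (saved ++ [pvSpin g]) (seen.insert (pvSpin g) i) (pvSpin g)) = 0
    cases hq : seen.get? (pvSpin g) with
    | some idx =>
      cases hpg : PySem.List.pyGet? saved (idx + PySem.Int.mod (cycles - idx) (i - idx) - 1) with
      | none => simp only [hpg, Option.getD_none]; exact pvLoad_noO [] (by intro r hr; simp at hr)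
      | some x =>
        simp only [hpg, Option.getD_some]
        exact pvLoad_noO x (hs x (PySem.List.mem_of_pyGet?_eq_some saved hpg))
    | none =>
      refine ih (i + 1) (saved ++ [pvSpin g]) _ (pvSpin g) hsp ?_
      intro s hsm
      rcases List.mem_append.mp hsm with h1 | h1
      · exact hs s h1
      · simp at h1; subst h1; exact hsp

-- ===== VERDICT (by name: the statement is the Claim_ definition above) =====
theorem count_load_after_cycles_spec : Claim_equal_count_load_after_cycles := by
  intro platform cycles _dom pre
  unfold Spec_count_load_after_cycles
  unfold count_load_after_cycles count_load_after_cycles_alt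
  by_cases hcyc : cycles ≤ 0
  · rw [Int.toNat_of_nonpos hcyc]
    exact (pvLoad_eq_countLoad (platform.map String.toList))
  · by_cases hno : pvNoO (platform.map String.toList)
    · rw [pvLoopA_noO cycles _ _ hno,
        pvLoopB_noO cycles _ 0 [] PySem.Dict.empty _ hno (by intro s hs; simp at hs)]
    · rcases pre with h1 | hrect | h2
      · exact absurd h1 hcyc
      · have hrect0 : pvIsRect (platform.headD "").toList.length (platform.map String.toList) := by
          intro r hr
          simp only [List.mem_map] at hr
          obtain ⟨s, hs, rfl⟩ := hr
          exact hrect s hs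
        have hex : ∃ r ∈ platform.map String.toList, 'O' ∈ r := by
          by_contra hcon
          push_neg at hcon
          exact hno hcon
        obtain ⟨row, hrowmem, hrowO⟩ := hex
        have hg0ne : platform.map String.toList ≠ [] := List.ne_nil_of_mem hrowmem
        have hw : 0 < (platform.headD "").toList.length := by
          rw [← hrect0 row hrowmem]
          exact List.length_pos_of_mem hrowO
        have key := pvLoop_eq (w := (platform.headD "").toList.length) cycles cycles.toNat
          [] PySem.Dict.empty (platform.map String.toList) hrect0 hg0ne hw
          (by intro s hs; simp at hs)
          (by intro x; rw [PySem.Dict.get?_empty]; rfl)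
        simpa using key
      · exact absurd (by
          intro r hr
          simp only [List.mem_map] at hr
          obtain ⟨s, hs, rfl⟩ := hr
          exact h2 s hs) hno
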